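-- pv_equiv track=rewrite | github.com/PaddyCox/project-euler | problem_90/p90_ii.py | check_combos
-- ===== SOURCE A (Python) =====
-- def check_combos(c):
--     pairs = ((0, 1), (0, 4), (0, 6), (1, 6), (2, 5), (3, 6), (4, 6), (6, 4), (8, 1))
--     for p in pairs:
--         if p[0] in c[0] and p[1] in c[1]:
--             continue
--         elif p[0] in c[1] and p[1] in c[0]:
--             continue
--         else:
--             return False
--     return True
-- ===== SOURCE B (Python) =====
-- def check_combos(c):
--     pairs = ((0, 1), (0, 4), (0, 6), (1, 6), (2, 5), (3, 6), (4, 6), (6, 4), (8, 1))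
--     digits = {0, 1, 2, 3, 4, 5, 6, 8}
--     d0 = digits.intersection(c[0])
--     d1 = digits.intersection(c[1])
--     achievable = {frozenset((a, b)) for a in d0 for b in d1}
--     return all(frozenset(p) in achievable for p in pairs)
-- ===== Notes on version B (the rewrite author's own statement) =====
-- stated objective: idiomatic
-- what changed: B intersects each die with the 8 relevant square digits, precomputes the set of achievable unordered pairs as frozensets, then does a flat all-membership check over the 9 required pairs, instead of testing each pair against both raw dice in both orientations with an early return.
import Mathlib
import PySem

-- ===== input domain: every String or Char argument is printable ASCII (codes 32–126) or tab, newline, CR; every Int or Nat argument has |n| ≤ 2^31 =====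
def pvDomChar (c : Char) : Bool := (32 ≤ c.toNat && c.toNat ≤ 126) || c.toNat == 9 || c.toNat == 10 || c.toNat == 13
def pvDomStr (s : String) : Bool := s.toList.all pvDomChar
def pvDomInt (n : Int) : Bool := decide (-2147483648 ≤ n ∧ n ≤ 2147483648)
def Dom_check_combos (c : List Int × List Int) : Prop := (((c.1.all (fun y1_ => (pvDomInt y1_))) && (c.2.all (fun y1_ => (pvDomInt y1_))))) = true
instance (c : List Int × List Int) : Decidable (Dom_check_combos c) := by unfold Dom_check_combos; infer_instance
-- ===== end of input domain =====

-- B builds the achievable unordered-pair set once and checks the 9 required pairs against it; same return value, different structure.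
-- ===== PORT A =====
def pvPairs : List (Int × Int) :=
  [(0, 1), (0, 4), (0, 6), (1, 6), (2, 5), (3, 6), (4, 6), (6, 4), (8, 1)]

def pvLoopA (c : List Int × List Int) : List (Int × Int) → Bool
  | [] => true
  | p :: rest =>
    if c.1.contains p.1 && c.2.contains p.2 then pvLoopA c rest
    else if c.2.contains p.1 && c.1.contains p.2 then pvLoopA c rest
    else false

def check_combos (c : List Int × List Int) : Bool := pvLoopA c pvPairs

-- ===== PORT B =====
-- frozenset((a, b)) of two ints, modelled exactly as the normalized (min, max) pair
def pvFz (a b : Int) : Int × Int := (min a b, max a b)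

def pvDigits : PySem.Set Int := PySem.Set.ofList [0, 1, 2, 3, 4, 5, 6, 8]

-- d0/d1 are sets; they are iterated only to build another set that is then only
-- queried for membership, so the result does not depend on Python's set order.
def check_combos_alt (c : List Int × List Int) : Bool :=
  let d0 : PySem.Set Int := PySem.Set.inter pvDigits c.1
  let d1 : PySem.Set Int := PySem.Set.inter pvDigits c.2
  let achievable : PySem.Set (Int × Int) :=
    PySem.Set.ofList (d0.flatMap (fun a => d1.map (fun b => pvFz a b)))
  pvPairs.all (fun p => PySem.Set.contains achievable (pvFz p.1 p.2))

-- ===== PRECONDITION & SPEC =====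
def Spec_check_combos (c : List Int × List Int) (out : Bool) : Prop := out = check_combos_alt c
instance (c : List Int × List Int) (out : Bool) : Decidable (Spec_check_combos c out) := by unfold Spec_check_combos; infer_instance

-- ===== CLAIM (what is proved, stated in full; the proofs are below) =====
def Claim_equal_check_combos : Prop := ∀ (c : List Int × List Int), Dom_check_combos c → Spec_check_combos c (check_combos c)

-- ===== LEMMAS AND PROOFS =====

-- ===== VERDICT (by name: the statement is the Claim_ definition above) =====
theorem pvFz_eq_iff (a b x y : Int) :
    pvFz a b = pvFz x y ↔ (a = x ∧ b = y) ∨ (a = y ∧ b = x) := by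
  simp only [pvFz, Prod.mk.injEq]
  constructor <;> intro h <;> [skip; skip] <;> omega

theorem pv_mem_achievable (l0 l1 : List Int) (x y : Int) :
    PySem.Set.contains
      (PySem.Set.ofList (l0.flatMap (fun a => l1.map (fun b => pvFz a b)))) (pvFz x y)
    = ((l0.contains x && l1.contains y) || (l1.contains x && l0.contains y)) := by
  rw [Bool.eq_iff_iff]
  simp only [PySem.Set.contains, List.contains_iff_mem, PySem.Set.mem_ofList,
    List.mem_flatMap, List.mem_map, Bool.or_eq_true, Bool.and_eq_true]
  constructor
  · rintro ⟨a, ha, b, hb, hab⟩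
    rcases (pvFz_eq_iff a b x y).1 hab with ⟨rfl, rfl⟩ | ⟨rfl, rfl⟩
    · exact Or.inl ⟨ha, hb⟩
    · exact Or.inr ⟨hb, ha⟩
  · rintro (⟨hx, hy⟩ | ⟨hx, hy⟩)
    · exact ⟨x, hx, y, hy, rfl⟩
    · exact ⟨y, hy, x, hx, (pvFz_eq_iff y x x y).2 (Or.inr ⟨rfl, rfl⟩)⟩

theorem pv_contains_inter (c0 : List Int) (x : Int) (hx : x ∈ pvDigits) :
    List.contains (PySem.Set.inter pvDigits c0) x = c0.contains x := by
  rw [Bool.eq_iff_iff]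
  simp only [PySem.Set.contains, List.contains_iff_mem, PySem.Set.mem_inter]
  exact ⟨fun h => h.2, fun h => ⟨hx, h⟩⟩

theorem pvLoopA_eq_all (c : List Int × List Int) (ps : List (Int × Int)) :
    pvLoopA c ps
      = ps.all (fun p => (c.1.contains p.1 && c.2.contains p.2)
                      || (c.2.contains p.1 && c.1.contains p.2)) := by
  induction ps with
  | nil => rfl
  | cons p rest ih =>
    cases hA : (c.1.contains p.1 && c.2.contains p.2) <;>
      cases hB : (c.2.contains p.1 && c.1.contains p.2) <;>
      simp only [pvLoopA, List.all_cons, ih, hA, hB] <;> simp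

theorem pvAllCongr {α : Type} (f g : α → Bool) (l : List α)
    (h : ∀ x ∈ l, f x = g x) : l.all f = l.all g := by
  induction l with
  | nil => rfl
  | cons a t ih =>
    simp only [List.all_cons, h a (List.mem_cons_self), ih (fun x hx => h x (List.mem_cons_of_mem a hx))]

theorem check_combos_spec : Claim_equal_check_combos := by
  intro c _
  simp only [Spec_check_combos, check_combos, check_combos_alt]
  rw [pvLoopA_eq_all]
  refine (pvAllCongr _ _ pvPairs (fun p hp => ?_)).symm
  have h12 : p.1 ∈ pvDigits ∧ p.2 ∈ pvDigits := by
    simp only [pvPairs, List.mem_cons, List.not_mem_nil, or_false] at hp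
    rcases hp with rfl | rfl | rfl | rfl | rfl | rfl | rfl | rfl | rfl <;> decide
  obtain ⟨h1, h2⟩ := h12
  rw [pv_mem_achievable, pv_contains_inter c.1 p.1 h1, pv_contains_inter c.2 p.2 h2,
      pv_contains_inter c.2 p.1 h1, pv_contains_inter c.1 p.2 h2]
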